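-- pv_equiv track=rewrite | github.com/benjamin-leifer/PhD_Markup_Experiment | Python_Codes/BLeifer_Battery_Analysis/battery_analysis/utils/verify_import.py | summarize_discrepancies
-- ===== SOURCE A (Python) =====
-- from typing import Dict, List, Iterable
--
-- def summarize_discrepancies(rows: Iterable[Dict[str, str]]) -> Dict[str, int]:
--     """Return counts of added, mismatched and missing items."""
--     counts = {"added": 0, "mismatched": 0, "missing": 0}
--     for row in rows:
--         status = row.get("status")
--         if status == "missing_db":
--             counts["added"] += 1
--         elif status in {"hash_mismatch", "gridfs_mismatch"}:
--             counts["mismatched"] += 1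
--         elif status in {"missing_file", "missing_gridfs"}:
--             counts["missing"] += 1
--     return counts
-- ===== SOURCE B (Python) =====
-- def summarize_discrepancies(rows):
--     """Return counts of added, mismatched and missing items."""
--     statuses = [row.get("status") for row in rows]
--     return {
--         "added": statuses.count("missing_db"),
--         "mismatched": statuses.count("hash_mismatch") + statuses.count("gridfs_mismatch"),
--         "missing": statuses.count("missing_file") + statuses.count("missing_gridfs"),
--     }
-- ===== Notes on version B (the rewrite author's own statement) =====
-- stated objective: simpler
-- what changed: Replaces the single loop with branch dispatch and in-place counter mutation by extracting the status of each row once and building the result dict directly from five list.count calls.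
import Mathlib
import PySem

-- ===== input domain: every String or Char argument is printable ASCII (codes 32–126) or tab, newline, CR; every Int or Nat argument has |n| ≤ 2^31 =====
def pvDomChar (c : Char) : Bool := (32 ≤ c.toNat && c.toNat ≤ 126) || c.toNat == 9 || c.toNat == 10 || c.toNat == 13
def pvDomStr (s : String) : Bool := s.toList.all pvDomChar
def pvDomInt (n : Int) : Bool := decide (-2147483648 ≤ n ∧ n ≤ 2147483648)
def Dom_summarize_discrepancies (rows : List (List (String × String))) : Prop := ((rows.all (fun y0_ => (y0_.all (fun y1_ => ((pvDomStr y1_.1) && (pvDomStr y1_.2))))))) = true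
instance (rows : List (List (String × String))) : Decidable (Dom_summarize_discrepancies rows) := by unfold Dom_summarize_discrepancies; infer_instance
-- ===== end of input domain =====

-- B replaces A's branch-dispatch loop with in-place counter mutation by a status projection plus five list counts (objective: simpler).


-- ===== PORT A =====
def sdStep (counts : PySem.Dict String Int) (row : List (String × String)) : PySem.Dict String Int :=
  let status := (PySem.Dict.mk row).get? "status"
  if status == some "missing_db" then counts.modify "added" 0 (· + 1)
  else if status == some "hash_mismatch" || status == some "gridfs_mismatch" then
    counts.modify "mismatched" 0 (· + 1)
  else if status == some "missing_file" || status == some "missing_gridfs" then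
    counts.modify "missing" 0 (· + 1)
  else counts

def summarize_discrepancies (rows : List (List (String × String))) : List (String × Int) :=
  (rows.foldl sdStep (PySem.Dict.ofList [("added", 0), ("mismatched", 0), ("missing", 0)])).items

-- ===== PORT B =====
def summarize_discrepancies_alt (rows : List (List (String × String))) : List (String × Int) :=
  let statuses := rows.map (fun row => (PySem.Dict.mk row).get? "status")
  [("added", (PySem.List.count statuses (some "missing_db") : Int)),
   ("mismatched", (PySem.List.count statuses (some "hash_mismatch") : Int)
                  + (PySem.List.count statuses (some "gridfs_mismatch") : Int)),
   ("missing", (PySem.List.count statuses (some "missing_file") : Int)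
               + (PySem.List.count statuses (some "missing_gridfs") : Int))]

-- ===== PRECONDITION & SPEC =====
def Spec_summarize_discrepancies (rows : List (List (String × String))) (out : List (String × Int)) : Prop := out = summarize_discrepancies_alt rows
instance (rows : List (List (String × String))) (out : List (String × Int)) : Decidable (Spec_summarize_discrepancies rows out) := by unfold Spec_summarize_discrepancies; infer_instance

-- ===== CLAIM (what is proved, stated in full; the proofs are below) =====
def Claim_equal_summarize_discrepancies : Prop := ∀ (rows : List (List (String × String))), Dom_summarize_discrepancies rows → Spec_summarize_discrepancies rows (summarize_discrepancies rows)

-- ===== LEMMAS AND PROOFS =====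
lemma sd_fold (rows : List (List (String × String))) (a m x : Int) :
    rows.foldl sdStep (PySem.Dict.mk [("added", a), ("mismatched", m), ("missing", x)]) =
    PySem.Dict.mk
      [("added", a + ((rows.map (fun row => (PySem.Dict.mk row).get? "status")).count (some "missing_db") : Int)),
       ("mismatched", m + ((rows.map (fun row => (PySem.Dict.mk row).get? "status")).count (some "hash_mismatch") : Int)
                        + ((rows.map (fun row => (PySem.Dict.mk row).get? "status")).count (some "gridfs_mismatch") : Int)),
       ("missing", x + ((rows.map (fun row => (PySem.Dict.mk row).get? "status")).count (some "missing_file") : Int)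
                     + ((rows.map (fun row => (PySem.Dict.mk row).get? "status")).count (some "missing_gridfs") : Int))] := by
  induction rows generalizing a m x with
  | nil => simp
  | cons row rest ih =>
    by_cases h1 : (PySem.Dict.mk row).get? "status" = some "missing_db"
    · have hstep : sdStep (PySem.Dict.mk [("added", a), ("mismatched", m), ("missing", x)]) row =
          PySem.Dict.mk [("added", a + 1), ("mismatched", m), ("missing", x)] := by
        simp only [sdStep, h1]
        simp [PySem.Dict.modify, PySem.Dict.getD, PySem.Dict.get?, PySem.Dict.insert,
          PySem.Dict.contains]
      rw [List.foldl_cons, hstep, ih]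
      simp [h1]
      omega
    · by_cases h2 : (PySem.Dict.mk row).get? "status" = some "hash_mismatch" ∨
          (PySem.Dict.mk row).get? "status" = some "gridfs_mismatch"
      · rcases h2 with h2 | h2 <;>
        · have hstep : sdStep (PySem.Dict.mk [("added", a), ("mismatched", m), ("missing", x)]) row =
              PySem.Dict.mk [("added", a), ("mismatched", m + 1), ("missing", x)] := by
            simp only [sdStep, h2]
            simp [PySem.Dict.modify, PySem.Dict.getD, PySem.Dict.get?, PySem.Dict.insert,
              PySem.Dict.contains]
          rw [List.foldl_cons, hstep, ih]
          simp [h2]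
          omega
      · push Not at h2
        by_cases h3 : (PySem.Dict.mk row).get? "status" = some "missing_file" ∨
            (PySem.Dict.mk row).get? "status" = some "missing_gridfs"
        · rcases h3 with h3 | h3 <;>
          · have hstep : sdStep (PySem.Dict.mk [("added", a), ("mismatched", m), ("missing", x)]) row =
                PySem.Dict.mk [("added", a), ("mismatched", m), ("missing", x + 1)] := by
              simp only [sdStep, h3]
              simp [PySem.Dict.modify, PySem.Dict.getD, PySem.Dict.get?, PySem.Dict.insert,
                PySem.Dict.contains]
            rw [List.foldl_cons, hstep, ih]
            simp [h3]
            omega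
        · push Not at h3
          have hstep : sdStep (PySem.Dict.mk [("added", a), ("mismatched", m), ("missing", x)]) row =
              PySem.Dict.mk [("added", a), ("mismatched", m), ("missing", x)] := by
            simp only [sdStep]
            simp [h1, h2.1, h2.2, h3.1, h3.2]
          rw [List.foldl_cons, hstep, ih]
          simp [h1, h2.1, h2.2, h3.1, h3.2]

-- ===== VERDICT (by name: the statement is the Claim_ definition above) =====
theorem summarize_discrepancies_spec : Claim_equal_summarize_discrepancies := by
  intro rows _
  unfold Spec_summarize_discrepancies summarize_discrepancies summarize_discrepancies_alt
  rw [show (PySem.Dict.ofList [("added", (0:Int)), ("mismatched", 0), ("missing", 0)]) =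
      PySem.Dict.mk [("added", 0), ("mismatched", 0), ("missing", 0)] from rfl,
    sd_fold]
  simp [PySem.List.count]
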